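-- pv_equiv track=rewrite | github.com/mihneadb/python-execution-trace | execution_trace/utils.py | strip_indent
-- ===== SOURCE A (Python) =====
-- import string
--
-- def find_indent_level(source):
--     """How indented is the def of the fn?"""
--     ws = set(string.whitespace)
--
--     for i, c in enumerate(source):
--         if c in ws:
--             continue
--         return i
--
--     return len(source)
--
-- def strip_indent(source):
--     """Strip leading indent to have source start at col 0."""
--     indent_level = find_indent_level(source)
--     lines = source.split('\n')
--
--     stripped_lines = []
--     for line in lines:
--         try:
--             line = line[indent_level:]
--         except IndexError:
--             # Whitespace only / blank line.
--             line = ''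
--         stripped_lines.append(line)
--     return '\n'.join(stripped_lines)
-- ===== SOURCE B (Python) =====
-- import string
--
--
-- def strip_indent(source):
--     """Strip leading indent to have source start at col 0.
--
--     Single pass over the characters: a character is kept iff it is a newline
--     or its column within its line is >= the indent level; no split/join.
--     """
--     ws = set(string.whitespace)
--     indent = next((i for i, c in enumerate(source) if c not in ws), len(source))
--     out = []
--     col = 0
--     for c in source:
--         if c == '\n':
--             out.append(c)
--             col = 0
--         else:
--             if col >= indent:
--                 out.append(c)
--             col += 1
--     return ''.join(out)
-- ===== Notes on version B (the rewrite author's own statement) =====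
-- stated objective: alternative
-- what changed: Replaces A's split-on-newline / per-line slicing / join pipeline with a single character-level pass that keeps a character iff it is a newline or its column within its line is at least the indent level, building the output directly.
import Mathlib
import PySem

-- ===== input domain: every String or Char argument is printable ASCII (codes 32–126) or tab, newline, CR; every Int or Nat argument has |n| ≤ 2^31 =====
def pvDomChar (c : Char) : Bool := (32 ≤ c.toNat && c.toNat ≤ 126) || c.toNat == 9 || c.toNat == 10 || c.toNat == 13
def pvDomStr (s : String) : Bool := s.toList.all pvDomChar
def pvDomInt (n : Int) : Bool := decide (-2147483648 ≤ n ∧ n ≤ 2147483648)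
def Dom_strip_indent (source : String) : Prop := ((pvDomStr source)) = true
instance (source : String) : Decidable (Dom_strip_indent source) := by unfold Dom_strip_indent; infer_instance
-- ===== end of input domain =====

-- B replaces A's split-on-newline/per-line-slice/join pipeline with one character-level pass
-- keeping a char iff it is a newline or its column is ≥ the indent level (alternative decomposition).

-- ===== PORT A =====
-- ws = set(string.whitespace)
def pvWsA : PySem.Set Char := PySem.Set.ofList " \t\n\r\x0b\x0c".toList

-- 'for i, c in enumerate(source): if c in ws: continue / return i' with fall-through 'return len(source)'
def pvFindGo (dflt : Int) : List (Int × Char) → Int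
  | [] => dflt
  | (i, c) :: rest => if PySem.Set.contains pvWsA c then pvFindGo dflt rest else i

def find_indent_level (source : String) : Int :=
  pvFindGo (PySem.Str.len source) (PySem.List.enumerate source.toList 0)

-- the try/except IndexError around the slice is dead code in Python (slicing never raises); ported without it
def strip_indent (source : String) : String :=
  let indent_level := find_indent_level source
  let lines := (PySem.Str.split? source "\n").getD []
  let stripped_lines := lines.foldl
    (fun acc line => acc ++ [PySem.Str.slice line (some indent_level) none]) ([] : List String)
  PySem.Str.join "\n" stripped_lines

-- ===== PORT B =====
def pvWsB : PySem.Set Char := PySem.Set.ofList " \t\n\r\x0b\x0c".toList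

-- next((i for i, c in enumerate(source) if c not in ws), len(source))
def pvNextIdx (dflt : Int) : List (Int × Char) → Int
  | [] => dflt
  | (i, c) :: rest => if !(PySem.Set.contains pvWsB c) then i else pvNextIdx dflt rest

def strip_indent_alt (source : String) : String :=
  let indent := pvNextIdx (PySem.Str.len source) (PySem.List.enumerate source.toList 0)
  let st := source.toList.foldl
    (fun (st : List Char × Int) c =>
      if c = '\n' then (st.1 ++ [c], 0)
      else (if st.2 ≥ indent then st.1 ++ [c] else st.1, st.2 + 1))
    (([] : List Char), (0 : Int))
  String.ofList st.1

-- ===== PRECONDITION & SPEC =====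
def Spec_strip_indent (source : String) (out : String) : Prop := out = strip_indent_alt source
instance (source : String) (out : String) : Decidable (Spec_strip_indent source out) := by unfold Spec_strip_indent; infer_instance

-- ===== CLAIM (what is proved, stated in full; the proofs are below) =====
def Claim_equal_strip_indent : Prop := ∀ (source : String), Dom_strip_indent source → Spec_strip_indent source (strip_indent source)

-- ===== LEMMAS AND PROOFS =====

-- the non-whitespace test both indent scans use
def pvP (c : Char) : Bool := !(PySem.Set.contains pvWsB c)

-- reference splitter: pySplitNl cs = (first '\n'-separated piece, remaining pieces)
def pySplitNl : List Char → List Char × List (List Char)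
  | [] => ([], [])
  | a :: rest =>
    let pr := pySplitNl rest
    if a = '\n' then ([], pr.1 :: pr.2) else (a :: pr.1, pr.2)

-- reference for B's pass, starting at column col
def stripSpec (n : Nat) : Nat → List Char → List Char
  | _, [] => []
  | col, a :: rest =>
    if a = '\n' then '\n' :: stripSpec n 0 rest
    else (if n ≤ col then [a] else []) ++ stripSpec n (col + 1) rest

def tailJoin (n : Nat) (ps : List (List Char)) : List Char :=
  (ps.map (fun q => '\n' :: q.drop n)).flatten

theorem pvWs_eq : pvWsB = pvWsA := rfl

theorem find_eq_next (d : Int) (l : List (Int × Char)) : pvFindGo d l = pvNextIdx d l := by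
  induction l with
  | nil => rfl
  | cons h t ih =>
    obtain ⟨i, c⟩ := h
    cases hc : PySem.Set.contains pvWsA c <;>
      simp [pvFindGo, pvNextIdx, pvWs_eq, ih]

theorem nextIdx_enumerate (cs : List Char) (s : Nat) (d : Int) :
    pvNextIdx d (PySem.List.enumerate cs (s : Int)) =
      if cs.findIdx pvP < cs.length then ((s + cs.findIdx pvP : Nat) : Int) else d := by
  induction cs generalizing s with
  | nil => simp [pvNextIdx, PySem.List.enumerate]
  | cons a t ih =>
    rw [PySem.List.enumerate.eq_2]
    have hs1 : ((s : Int) + 1) = ((s + 1 : Nat) : Int) := by push_cast; ring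
    rw [List.findIdx_cons]
    cases hc : pvWsB.contains a with
    | false =>
      have hpa : pvP a = true := by unfold pvP; rw [hc]; rfl
      have hnm : a ∉ pvWsB := by
        have h' := hc
        rw [PySem.Set.contains_eq_decide] at h'
        exact of_decide_eq_false h'
      simp [pvNextIdx, hpa, hnm]
    | true =>
      have hpa : pvP a = false := by unfold pvP; rw [hc]; rfl
      have hm : a ∈ pvWsB := by
        have h' := hc
        rw [PySem.Set.contains_eq_decide] at h'
        exact of_decide_eq_true h'
      have hskip : pvNextIdx d (((s : Int), a) :: PySem.List.enumerate t ((s : Int) + 1))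
          = pvNextIdx d (PySem.List.enumerate t ((s : Int) + 1)) := by
        simp [pvNextIdx, hm]
      rw [hskip, hs1, ih (s + 1), hpa]
      simp only [cond_false, List.length_cons]
      by_cases h : List.findIdx pvP t < t.length
      · rw [if_pos h, if_pos (by omega)]
        congr 1
        omega
      · rw [if_neg h, if_neg (by omega)]

theorem indent_eq (source : String) :
    pvNextIdx (PySem.Str.len source) (PySem.List.enumerate source.toList 0) =
      ((source.toList.findIdx pvP : Nat) : Int) := by
  have h0 : (0 : Int) = ((0 : Nat) : Int) := rfl
  rw [h0, nextIdx_enumerate]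
  have hle := List.findIdx_le_length (p := pvP) (xs := source.toList)
  by_cases h : source.toList.findIdx pvP < source.toList.length
  · rw [if_pos h]
    simp
  · rw [if_neg h]
    have heq : source.toList.findIdx pvP = source.toList.length := by omega
    simp [PySem.Str.len, heq]

theorem go_spec (l : List Char) : ∀ (fuel : Nat) (cur : List Char) (acc : List (List Char)),
    l.length ≤ fuel →
    PySem.Chars.splitOn.go ['\n'] fuel l cur acc
      = acc.reverse ++ ((cur.reverse ++ (pySplitNl l).1) :: (pySplitNl l).2) := by
  induction l with
  | nil =>
    intro fuel cur acc _
    cases fuel <;> simp [PySem.Chars.splitOn.go, pySplitNl]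
  | cons a rest ih =>
    intro fuel cur acc hle
    cases fuel with
    | zero => simp at hle
    | succ f =>
      rw [PySem.Chars.splitOn.go]
      by_cases ha : a = '\n'
      · subst ha
        rw [if_pos (by simp [List.isPrefixOf])]
        rw [show List.drop (['\n'].length) ('\n' :: rest) = rest from rfl]
        rw [ih f [] (cur.reverse :: acc) (by simp at hle; omega)]
        simp [pySplitNl]
      · rw [if_neg (by simp [List.isPrefixOf]; exact fun h => ha h.symm)]
        rw [ih f (a :: cur) acc (by simp at hle; omega)]
        simp [pySplitNl, ha]

theorem splitOn_nl (cs : List Char) :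
    PySem.Chars.splitOn cs ['\n'] = (pySplitNl cs).1 :: (pySplitNl cs).2 := by
  unfold PySem.Chars.splitOn
  rw [go_spec cs (cs.length + 1) [] [] (by omega)]
  simp

theorem foldl_push {α β : Type} (f : α → β) (l : List α) (acc : List β) :
    l.foldl (fun a x => a ++ [f x]) acc = acc ++ l.map f := by
  induction l generalizing acc with
  | nil => simp
  | cons x t ih => simp [ih]

theorem join_map_drop (n : Nat) (p : List Char) (ps : List (List Char)) :
    PySem.Chars.join ['\n'] ((p :: ps).map (List.drop n)) = p.drop n ++ tailJoin n ps := by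
  induction ps generalizing p with
  | nil => simp [PySem.Chars.join_singleton, tailJoin]
  | cons q t ih =>
    simp only [List.map_cons] at ih ⊢
    rw [PySem.Chars.join_cons_cons, ih]
    simp [tailJoin]

def pvStep (ind : Int) (st : List Char × Int) (c : Char) : List Char × Int :=
  if c = '\n' then (st.1 ++ [c], 0)
  else (if st.2 ≥ ind then st.1 ++ [c] else st.1, st.2 + 1)

theorem foldl_strip (n : Nat) (cs : List Char) : ∀ (out : List Char) (col : Nat),
    (cs.foldl (pvStep ((n : Nat) : Int)) (out, (col : Int))).1 = out ++ stripSpec n col cs := by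
  induction cs with
  | nil => intro out col; simp [stripSpec]
  | cons a t ih =>
    intro out col
    rw [List.foldl_cons]
    by_cases ha : a = '\n'
    · subst ha
      rw [show pvStep ((n : Nat) : Int) (out, (col : Int)) '\n' = (out ++ ['\n'], ((0 : Nat) : Int)) from by
        simp [pvStep]]
      rw [ih]
      simp [stripSpec]
    · by_cases hc : n ≤ col
      · have hge : ((n : Nat) : Int) ≤ (col : Int) := by exact_mod_cast hc
        rw [show pvStep ((n : Nat) : Int) (out, (col : Int)) a = (out ++ [a], ((col + 1 : Nat) : Int)) from by
          simp [pvStep, ha, hge]]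
        rw [ih]
        simp [stripSpec, ha, hc]
      · have hlt : ¬ (((n : Nat) : Int) ≤ (col : Int)) := by exact_mod_cast hc
        rw [show pvStep ((n : Nat) : Int) (out, (col : Int)) a = (out, ((col + 1 : Nat) : Int)) from by
          simp [pvStep, ha, hlt]]
        rw [ih]
        simp [stripSpec, ha, hc]

theorem stripSpec_eq (n : Nat) (cs : List Char) : ∀ (col : Nat),
    stripSpec n col cs = List.drop (n - col) (pySplitNl cs).1 ++ tailJoin n (pySplitNl cs).2 := by
  induction cs with
  | nil => intro col; simp [stripSpec, pySplitNl, tailJoin]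
  | cons a t ih =>
    intro col
    by_cases ha : a = '\n'
    · subst ha
      simp only [stripSpec, pySplitNl, ih 0]
      simp [tailJoin]
    · simp only [stripSpec, if_neg ha, pySplitNl, ih (col + 1)]
      by_cases hc : n ≤ col
      · have h1 : n - col = 0 := by omega
        have h2 : n - (col + 1) = 0 := by omega
        simp [hc, h1, h2]
      · have h1 : n - col = (n - (col + 1)) + 1 := by omega
        simp [hc, h1, List.drop_succ_cons]

-- ===== VERDICT (by name: the statement is the Claim_ definition above) =====
theorem strip_indent_spec : Claim_equal_strip_indent := by
  intro source _
  unfold Spec_strip_indent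
  simp only [strip_indent, strip_indent_alt, find_indent_level]
  rw [find_eq_next, indent_eq]
  set cs := source.toList with hcs
  set n := cs.findIdx pvP with hn
  have hsplit : (PySem.Str.split? source "\n").getD []
      = ((pySplitNl cs).1 :: (pySplitNl cs).2).map String.ofList := by
    unfold PySem.Str.split? PySem.Chars.split?
    simp [splitOn_nl, ← hcs]
  rw [hsplit, foldl_push, List.nil_append]
  have hmapmap : ∀ (ls : List (List Char)),
      ((ls.map String.ofList).map
        (fun line => PySem.Str.slice line (some ((n : Nat) : Int)) none)).map String.toList
      = ls.map (List.drop n) := by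
    intro ls
    simp [Function.comp_def, PySem.Str.toList_slice, PySem.Chars.slice_eq_listSlice,
      PySem.List.slice_from_natCast]
  have hA : PySem.Str.join "\n"
      ((((pySplitNl cs).1 :: (pySplitNl cs).2).map String.ofList).map
        (fun line => PySem.Str.slice line (some ((n : Nat) : Int)) none))
      = String.ofList (List.drop n (pySplitNl cs).1 ++ tailJoin n (pySplitNl cs).2) := by
    unfold PySem.Str.join
    rw [hmapmap]
    rw [show ("\n" : String).toList = ['\n'] from rfl]
    rw [show ((pySplitNl cs).1 :: (pySplitNl cs).2).map (List.drop n)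
        = List.drop n (pySplitNl cs).1 :: (pySplitNl cs).2.map (List.drop n) from by simp]
    rw [show (List.drop n (pySplitNl cs).1 :: (pySplitNl cs).2.map (List.drop n))
        = ((pySplitNl cs).1 :: (pySplitNl cs).2).map (List.drop n) from by simp]
    rw [join_map_drop]
  rw [hA]
  have hfun : (fun (st : List Char × Int) c =>
      if c = '\n' then (st.1 ++ [c], 0)
      else (if st.2 ≥ ((n : Nat) : Int) then st.1 ++ [c] else st.1, st.2 + 1))
      = pvStep ((n : Nat) : Int) := rfl
  rw [hfun, show (0 : Int) = ((0 : Nat) : Int) from rfl]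
  rw [foldl_strip n cs [] 0]
  rw [stripSpec_eq n cs 0, Nat.sub_zero]
  simp
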